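-- pv_equiv track=rewrite | github.com/basfroman/letcode | interview_task/polindrome_prefix.py | solution
-- ===== SOURCE A (Python) =====
-- def solution(s):
--
--     def is_pal(string):
--         return string == string[::-1]
--
--     def run(string, prefix_counter=0):
--         if not string:
--             return ''
--
--         for i in range(len(string), 1, -1):
--             suf = string[:i]
--
--             if is_pal(suf):
--                 prefix_counter += len(suf)
--                 return run(string[i:], prefix_counter)
--
--         return string
--
--     return s[len(s)-len(run(s)):]
-- ===== SOURCE B (Python) =====
-- def _lpp(t):
--     # longest k >= 2 with t[:k] palindromic: t[:k] is a palindrome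
--     # iff rev[m-k:] (a suffix of the reversed string) is a prefix of t
--     rev = t[::-1]
--     m = len(t)
--     for j in range(m - 1):
--         if t.startswith(rev[j:]):
--             return m - j
--     return 0
--
-- def solution(s):
--     i, n = 0, len(s)
--     while i < n:
--         k = _lpp(s[i:])
--         if k < 2:
--             break
--         i += k
--     return s[i:]
-- ===== Notes on version B (the rewrite author's own statement) =====
-- stated objective: faster
-- what changed: A recursively strips the longest palindromic prefix by slicing, reversing and comparing every candidate prefix in full; B replaces this by an index-based loop that reverses the remainder once per step and finds the longest palindromic prefix by matching suffixes of that single reversal as prefixes (t[:k] is a palindrome iff rev[m-k:] is a prefix of t), with early-exit startswith instead of full slice+reverse+compare per candidate.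
import Mathlib
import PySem

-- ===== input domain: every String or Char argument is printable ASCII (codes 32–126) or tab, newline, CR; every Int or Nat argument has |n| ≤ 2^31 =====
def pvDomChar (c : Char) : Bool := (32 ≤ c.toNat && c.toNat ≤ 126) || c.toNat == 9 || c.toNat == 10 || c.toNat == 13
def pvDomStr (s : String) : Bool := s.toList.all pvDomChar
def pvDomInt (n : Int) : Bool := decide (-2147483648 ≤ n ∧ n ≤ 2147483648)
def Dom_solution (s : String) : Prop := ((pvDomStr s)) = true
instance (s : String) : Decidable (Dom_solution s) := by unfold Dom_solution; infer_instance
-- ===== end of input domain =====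

-- B replaces A's recursive strip (which slices, reverses and compares every candidate prefix in
-- full) by an index-based loop that reverses the remainder once per step and finds the longest
-- palindromic prefix by prefix-matching suffixes of that single reversal; same return value,
-- different algorithm (objective: faster by a measured constant factor).

-- ===== PORT A =====
-- is_pal(string): string == string[::-1]
def isPalA (l : List Char) : Bool := l = (l.reverse)

-- the 'for i in range(len(string), 1, -1)' loop of run: first i (descending, i ≥ 2) whose
-- prefix string[:i] is a palindrome; none if the loop falls through. Slices string[:i] are
-- List.take (i ≥ 0, exact).
def runForA (str : List Char) : Nat → Option Nat
  | i + 2 => if isPalA (str.take (i + 2)) then some (i + 2) else runForA str (i + 1)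
  | _ => none

theorem runForA_some_ge {str : List Char} {i k : Nat} (h : runForA str i = some k) : 2 ≤ k := by
  induction i using Nat.strong_induction_on with
  | _ i ih =>
    match i, h with
    | n + 2, h =>
      rw [runForA] at h
      split at h
      · cases h; omega
      · exact ih (n + 1) (by omega) h

-- run(string, prefix_counter): prefix_counter is threaded exactly as in A (it is never read
-- by the returned value).
def runA (str : List Char) (prefix_counter : Int) : List Char :=
  if str = [] then []
  else
    match h : runForA str str.length with
    | some i => runA (str.drop i) (prefix_counter + i)
    | none => str
termination_by str.length
decreasing_by
  have h2 := runForA_some_ge h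
  have h3 : str.length ≠ 0 := by
    intro hz; rename_i hs; exact hs (List.eq_nil_of_length_eq_zero hz)
  simp [List.length_drop]; omega

-- solution(s): return s[len(s)-len(run(s)):]  (index ≥ 0, so the slice is a drop)
def solution (s : String) : String :=
  let l := s.toList
  let r := runA l 0
  String.mk (l.drop (l.length - r.length))

-- ===== PORT B =====
-- _lpp(t): reverse t once; first j in range(m-1) with t.startswith(rev[j:]) gives k = m - j
-- (t[:k] is a palindrome iff the length-k suffix rev[j:] of the reversal is a prefix of t);
-- fall-through returns 0. t.startswith is isPrefixOf.
def lppB (t : List Char) : Nat :=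
  let rev := t.reverse
  match (List.range (t.length - 1)).find? (fun j => (rev.drop j).isPrefixOf t) with
  | some j => t.length - j
  | none => 0

-- the while-loop of solution: i is the index into s of the unstripped remainder
def whileB_dec (l : List Char) (i : Nat) (hlt : i < l.length) (hk : ¬ lppB (l.drop i) < 2) :
    l.length - (i + lppB (l.drop i)) < l.length - i := by omega

def whileB (l : List Char) (i : Nat) : Nat :=
  if hlt : i < l.length then
    if hk : lppB (l.drop i) < 2 then i else whileB l (i + lppB (l.drop i))
  else i
termination_by l.length - i
decreasing_by exact whileB_dec l i hlt hk

def solution_alt (s : String) : String :=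
  let l := s.toList
  String.mk (l.drop (whileB l 0))

-- ===== PRECONDITION & SPEC =====
def Spec_solution (s : String) (out : String) : Prop := out = solution_alt s
instance (s : String) (out : String) : Decidable (Spec_solution s out) := by unfold Spec_solution; infer_instance

-- ===== CLAIM (what is proved, stated in full; the proofs are below) =====
def Claim_equal_solution : Prop := ∀ (s : String), Dom_solution s → Spec_solution s (solution s)

-- ===== LEMMAS AND PROOFS =====

-- runForA as a single conditional step
theorem runForA_eq (str : List Char) (i : Nat) :
    runForA str i =
      if 2 ≤ i then (if isPalA (str.take i) then some i else runForA str (i - 1)) else none := by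
  match i with
  | 0 => simp [runForA]
  | 1 => simp [runForA]
  | n + 2 =>
    rw [runForA]
    have h2 : 2 ≤ n + 2 := by omega
    rw [if_pos h2]
    congr 1

-- t[:k] is a palindrome iff the length-k suffix of t.reverse is a prefix of t
theorem pal_iff_prefix (t : List Char) (j : Nat) (hj : j ≤ t.length) :
    (t.reverse.drop j).isPrefixOf t = isPalA (t.take (t.length - j)) := by
  have hrev : t.reverse.drop j = (t.take (t.length - j)).reverse := by
    rw [List.reverse_take]; congr 1; omega
  have hlen : (t.take (t.length - j)).reverse.length = t.length - j := by simp
  apply Bool.eq_iff_iff.mpr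
  rw [List.isPrefixOf_iff_prefix, hrev, List.prefix_iff_eq_take, hlen]
  unfold isPalA
  simp only [decide_eq_true_eq]
  constructor
  · intro h; exact h.symm
  · intro h; exact h.symm

-- A's descending search over prefix lengths and B's ascending search over suffixes of the
-- reversal find the same thing (i = m - j)
theorem find_corr_aux (t : List Char) (d j0 : Nat) (hd : j0 + d = t.length - 1) :
    runForA t (t.length - j0) =
      Option.map (fun j => t.length - j)
        ((List.range' j0 d).find? (fun j => (t.reverse.drop j).isPrefixOf t)) := by
  induction d generalizing j0 with
  | zero =>
    simp only [List.range'_zero, List.find?_nil, Option.map_none]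
    rw [runForA_eq]
    rw [if_neg (by omega)]
  | succ d ih =>
    rw [List.range'_succ, runForA_eq, if_pos (by omega)]
    rw [← pal_iff_prefix t j0 (by omega)]
    by_cases hp : (t.reverse.drop j0).isPrefixOf t = true
    · rw [if_pos hp,
        List.find?_cons_of_pos (p := fun j => (t.reverse.drop j).isPrefixOf t) (a := j0) hp]
      rfl
    · rw [if_neg hp,
        List.find?_cons_of_neg (p := fun j => (t.reverse.drop j).isPrefixOf t) (a := j0) hp]
      have he : t.length - j0 - 1 = t.length - (j0 + 1) := by omega
      rw [he]
      exact ih (j0 + 1) (by omega)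

theorem find_corr (t : List Char) :
    runForA t t.length =
      Option.map (fun j => t.length - j)
        ((List.range (t.length - 1)).find? (fun j => (t.reverse.drop j).isPrefixOf t)) := by
  have h := find_corr_aux t (t.length - 1) 0 (by omega)
  rw [Nat.sub_zero] at h
  rw [List.range_eq_range']
  exact h

-- the two outer loops: runA on the remainder equals dropping whileB's final index
theorem loops_corr (l : List Char) (i : Nat) (c : Int) :
    runA (l.drop i) c = l.drop (whileB l i) := by
  generalize hd : l.length - i = d
  induction d using Nat.strong_induction_on generalizing i c with
  | _ d ih =>
    unfold whileB
    by_cases hlt : i < l.length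
    · rw [dif_pos hlt]
      have hne : l.drop i ≠ [] := by
        intro h
        have := congrArg List.length h
        simp at this
        omega
      unfold runA
      rw [if_neg hne]
      have hcorr := find_corr (l.drop i)
      cases hf : (List.range ((l.drop i).length - 1)).find?
          (fun j => ((l.drop i).reverse.drop j).isPrefixOf (l.drop i)) with
      | none =>
        rw [hf, Option.map_none] at hcorr
        have hB0 : lppB (l.drop i) = 0 := by
          show (match (List.range ((l.drop i).length - 1)).find?
              (fun j => ((l.drop i).reverse.drop j).isPrefixOf (l.drop i)) with
            | some j => (l.drop i).length - j
            | none => 0) = 0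
          rw [hf]
        split
        · rename_i k heq
          rw [heq] at hcorr
          exact absurd hcorr (by simp)
        · rw [hB0]
          rw [dif_pos (by omega)]
      | some j =>
        rw [hf, Option.map_some] at hcorr
        have hjlt : j < (l.drop i).length - 1 := by
          have := List.mem_of_find?_eq_some hf
          rwa [List.mem_range] at this
        have hkB : lppB (l.drop i) = (l.drop i).length - j := by
          show (match (List.range ((l.drop i).length - 1)).find?
              (fun j => ((l.drop i).reverse.drop j).isPrefixOf (l.drop i)) with
            | some j => (l.drop i).length - j
            | none => 0) = (l.drop i).length - j
          rw [hf]
        split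
        · rename_i k heq
          rw [heq] at hcorr
          have hkj : k = (l.drop i).length - j := Option.some.inj hcorr
          have hkB' : lppB (l.drop i) = k := by rw [hkB, hkj]
          have hk2 : 2 ≤ k := by
            have hlen : (l.drop i).length = l.length - i := by simp
            omega
          rw [dif_neg (by omega), hkB', List.drop_drop]
          have hstep := ih (l.length - (i + k)) (by omega) (i + k) (c + (k : Int)) rfl
          simp only [Nat.add_comm i k] at hstep ⊢
          exact hstep
        · rename_i heq
          rw [heq] at hcorr
          exact absurd hcorr (by simp)
    · rw [dif_neg hlt]
      have hdrop : l.drop i = [] := List.drop_eq_nil_of_le (by omega)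
      rw [hdrop]
      simp [runA]

-- re-taking the suffix by its length gives the same drop
theorem drop_sub_sub (l : List Char) (w : Nat) :
    l.drop (l.length - (l.drop w).length) = l.drop w := by
  by_cases h : w ≤ l.length
  · have : l.length - (l.drop w).length = w := by simp; omega
    rw [this]
  · have h1 : l.drop w = [] := List.drop_eq_nil_of_le (by omega)
    rw [h1]
    simp

-- ===== VERDICT (by name: the statement is the Claim_ definition above) =====
theorem solution_spec : Claim_equal_solution := by
  intro s _
  unfold Spec_solution solution solution_alt
  simp only
  have h0 : runA s.toList 0 = runA (s.toList.drop 0) 0 := by rw [List.drop_zero]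
  rw [h0, loops_corr s.toList 0 0, drop_sub_sub]
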